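-- pv_equiv track=rewrite | github.com/mdcourse/mdcourse.github.io | tests/utilities.py | detect_last_matching_line
-- ===== SOURCE A (Python) =====
-- def detect_last_matching_line(content, original_file_content):
--     for cpt_new, new_line in enumerate(content):
--         if len(new_line) > 1:
--             for cpt_old, older_line in enumerate(original_file_content):
--                 if len(older_line) > 0:
--                     if new_line in older_line:
--                         cpt_new_last = cpt_new
--                         cpt_old_last = cpt_old
--     return cpt_new_last, cpt_old_last
-- ===== SOURCE B (Python) =====
-- def detect_last_matching_line(content, original_file_content):
--     # Reverse search with early exit: the first hit scanning both lists
--     # from the end is exactly the last hit of a full forward scan.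
--     rev_old = list(reversed(list(enumerate(original_file_content))))
--     for cpt_new, new_line in reversed(list(enumerate(content))):
--         if len(new_line) > 1:
--             for cpt_old, older_line in rev_old:
--                 if len(older_line) > 0 and new_line in older_line:
--                     return cpt_new, cpt_old
--     raise LookupError("no matching line")
-- ===== Notes on version B (the rewrite author's own statement) =====
-- stated objective: faster
-- what changed: Replaced A's exhaustive forward double scan that overwrites the answer on every match with a reverse-order search that returns on the first hit (early exit from both loops).
import Mathlib
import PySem

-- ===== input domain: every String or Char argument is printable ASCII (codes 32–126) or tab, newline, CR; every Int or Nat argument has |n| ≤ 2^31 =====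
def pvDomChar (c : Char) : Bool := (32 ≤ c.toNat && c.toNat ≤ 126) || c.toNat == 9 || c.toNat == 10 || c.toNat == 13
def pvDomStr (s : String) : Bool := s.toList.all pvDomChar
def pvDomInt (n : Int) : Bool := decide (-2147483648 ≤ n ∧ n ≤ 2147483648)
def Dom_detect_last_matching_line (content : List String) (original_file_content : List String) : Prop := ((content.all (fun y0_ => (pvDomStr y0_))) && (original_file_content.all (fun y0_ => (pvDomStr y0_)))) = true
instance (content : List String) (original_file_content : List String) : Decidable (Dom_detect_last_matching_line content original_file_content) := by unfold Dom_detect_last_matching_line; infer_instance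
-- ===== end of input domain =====

-- B replaces A's exhaustive forward double scan (overwriting the answer on every
-- match) by a reverse-order search that stops at the first hit from the end.

-- ===== PORT A =====
def detect_last_matching_line (content : List String) (original_file_content : List String) : Int × Int :=
  let st :=
    (PySem.List.enumerate content 0).foldl
      (fun s p =>
        if 1 < PySem.Str.len p.2 then
          (PySem.List.enumerate original_file_content 0).foldl
            (fun s2 q =>
              if 0 < PySem.Str.len q.2 then
                if PySem.Str.isIn p.2 q.2 then some (p.1, q.1) else s2
              else s2)
            s
        else s)
      (none : Option (Int × Int))
  -- Python raises UnboundLocalError when st = none; those inputs are excluded by Pre_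
  st.getD (0, 0)

-- ===== PORT B =====
def dlml_inner (nl : String) : List (Int × String) → Option Int
  | [] => none
  | q :: rest =>
      if 0 < PySem.Str.len q.2 ∧ PySem.Str.isIn nl q.2 then some q.1
      else dlml_inner nl rest

def dlml_outer (rev_old : List (Int × String)) : List (Int × String) → Option (Int × Int)
  | [] => none
  | p :: rest =>
      if 1 < PySem.Str.len p.2 then
        match dlml_inner p.2 rev_old with
        | some j => some (p.1, j)
        | none => dlml_outer rev_old rest
      else dlml_outer rev_old rest

def detect_last_matching_line_alt (content : List String) (original_file_content : List String) : Int × Int :=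
  match dlml_outer ((PySem.List.enumerate original_file_content 0).reverse)
      ((PySem.List.enumerate content 0).reverse) with
  | some r => r
  | none => (0, 0)  -- Python B raises LookupError here; excluded by Pre_

-- ===== PRECONDITION & SPEC =====
-- Pre_ excludes exactly the no-match inputs, on which Python A raises UnboundLocalError.
def Pre_detect_last_matching_line (content : List String) (original_file_content : List String) : Prop :=
  ∃ nl ∈ content, 1 < PySem.Str.len nl ∧
    ∃ old ∈ original_file_content, 0 < PySem.Str.len old ∧ PySem.Str.isIn nl old = true
instance (content : List String) (original_file_content : List String) : Decidable (Pre_detect_last_matching_line content original_file_content) := by unfold Pre_detect_last_matching_line; infer_instance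

def pvWitness_detect_last_matching_line : List String × List String := (["ab"], ["xabx"])

def Spec_detect_last_matching_line (content : List String) (original_file_content : List String) (out : Int × Int) : Prop := out = detect_last_matching_line_alt content original_file_content
instance (content : List String) (original_file_content : List String) (out : Int × Int) : Decidable (Spec_detect_last_matching_line content original_file_content out) := by unfold Spec_detect_last_matching_line; infer_instance

-- ===== CLAIM (what is proved, stated in full; the proofs are below) =====
def Claim_equal_detect_last_matching_line : Prop := ∀ (content : List String) (original_file_content : List String), Dom_detect_last_matching_line content original_file_content → Pre_detect_last_matching_line content original_file_content → Spec_detect_last_matching_line content original_file_content (detect_last_matching_line content original_file_content)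

-- ===== LEMMAS AND PROOFS =====

-- the inner test "len(older_line) > 0 and new_line in older_line", as a Bool predicate
def dlmlP (nl : String) (q : Int × String) : Bool :=
  decide (0 < PySem.Str.len q.2) && PySem.Str.isIn nl q.2

-- the outer test "len(new_line) > 1 and some old line matches"
def dlmlQ (revO : List (Int × String)) (p : Int × String) : Bool :=
  decide (1 < PySem.Str.len p.2) && (revO.find? (dlmlP p.2)).isSome

-- the answer extracted for a qualifying new line
def dlmlF (revO : List (Int × String)) (p : Int × String) : Int × Int :=
  ((revO.find? (dlmlP p.2)).map (fun q => (p.1, q.1))).getD (0, 0)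

-- a foldl that overwrites its state at every element satisfying p computes the LAST
-- such element, i.e. the first one of the reversed list
theorem foldl_overwrite {α β : Type} (p : α → Bool) (f : α → β) :
    ∀ (l : List α) (init : Option β),
      l.foldl (fun s x => if p x then some (f x) else s) init
        = (match l.reverse.find? p with
           | some x => some (f x)
           | none => init) := by
  intro l
  induction l with
  | nil => intro init; simp
  | cons x xs ih =>
      intro init
      rw [List.foldl_cons, ih, List.reverse_cons, List.find?_append]
      cases h : xs.reverse.find? p with
      | some y => simp [h]
      | none =>
          cases hx : p x <;> simp [List.find?, hx]

theorem dlml_inner_eq (nl : String) (l : List (Int × String)) :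
    dlml_inner nl l = (l.find? (dlmlP nl)).map (·.1) := by
  induction l with
  | nil => simp [dlml_inner]
  | cons q rest ih =>
      by_cases h : 0 < PySem.Str.len q.2 ∧ PySem.Str.isIn nl q.2
      · obtain ⟨h1, h2⟩ := h
        simp at h1
        simp at h2
        simp [dlml_inner, List.find?, dlmlP, h1, h2]
      · have hb : dlmlP nl q = false := by
          simp only [dlmlP, Bool.and_eq_false_iff]
          by_cases h1 : 0 < PySem.Str.len q.2
          · right; cases h2 : PySem.Str.isIn nl q.2
            · simp [h2]
            · exact absurd ⟨h1, h2⟩ h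
          · left; simpa [PySem.Str.len_eq] using h1
        have h' : ¬ (0 < q.2.length ∧ PySem.Chars.isIn nl.toList q.2.toList = true) := by
          simpa [PySem.Str.len_eq, PySem.Str.isIn_eq] using h
        simp [dlml_inner, List.find?, hb, ih, h']

theorem dlml_outer_eq (revO : List (Int × String)) (l : List (Int × String)) :
    dlml_outer revO l = (l.find? (dlmlQ revO)).map (dlmlF revO) := by
  induction l with
  | nil => simp [dlml_outer]
  | cons p rest ih =>
      by_cases h : 1 < PySem.Str.len p.2
      · have h' : 1 < p.2.length := by simpa [PySem.Str.len_eq] using h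
        cases hf : revO.find? (dlmlP p.2) with
        | some q =>
            have hq : dlmlQ revO p = true := by simp [dlmlQ, h', hf]
            simp [dlml_outer, dlml_inner_eq, hf, List.find?, hq, dlmlF, h']
        | none =>
            have hq : dlmlQ revO p = false := by simp [dlmlQ, hf]
            simp [dlml_outer, dlml_inner_eq, hf, List.find?, hq, ih, h']
      · have h' : ¬ 1 < p.2.length := by simpa [PySem.Str.len_eq] using h
        have hq : dlmlQ revO p = false := by simp [dlmlQ, h']
        simp [dlml_outer, List.find?, hq, ih, h']

-- A's inner foldl, reshaped to the overwrite form
theorem inner_step_eq (i : Int) (nl : String) :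
    (fun (s2 : Option (Int × Int)) (q : Int × String) =>
        if 0 < PySem.Str.len q.2 then
          if PySem.Str.isIn nl q.2 then some (i, q.1) else s2
        else s2)
      = (fun s2 q => if dlmlP nl q then some ((fun q : Int × String => (i, q.1)) q) else s2) := by
  funext s2 q
  by_cases h1 : 0 < q.2.length <;> cases h2 : PySem.Chars.isIn nl.toList q.2.toList <;>
    simp [dlmlP, h1, h2]

theorem detect_A_eq (content original_file_content : List String) :
    detect_last_matching_line content original_file_content
      = (((PySem.List.enumerate content 0).reverse.find?
            (dlmlQ ((PySem.List.enumerate original_file_content 0).reverse))).map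
          (dlmlF ((PySem.List.enumerate original_file_content 0).reverse))).getD (0, 0) := by
  unfold detect_last_matching_line
  have houter :
      (fun (s : Option (Int × Int)) (p : Int × String) =>
          if 1 < PySem.Str.len p.2 then
            (PySem.List.enumerate original_file_content 0).foldl
              (fun s2 q =>
                if 0 < PySem.Str.len q.2 then
                  if PySem.Str.isIn p.2 q.2 then some (p.1, q.1) else s2
                else s2)
              s
          else s)
        = (fun s p =>
            if dlmlQ ((PySem.List.enumerate original_file_content 0).reverse) p then
              some (dlmlF ((PySem.List.enumerate original_file_content 0).reverse) p)
            else s) := by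
    funext s p
    rw [inner_step_eq p.1 p.2,
        foldl_overwrite (dlmlP p.2) (fun q : Int × String => (p.1, q.1))]
    cases hf : (PySem.List.enumerate original_file_content 0).reverse.find? (dlmlP p.2) with
    | some q =>
        by_cases h : 1 < p.2.length <;> simp [dlmlQ, dlmlF, h, hf]
    | none =>
        by_cases h : 1 < p.2.length <;> simp [dlmlQ, h, hf]
  rw [houter,
      foldl_overwrite (dlmlQ ((PySem.List.enumerate original_file_content 0).reverse))
        (dlmlF ((PySem.List.enumerate original_file_content 0).reverse))]
  cases hf : (PySem.List.enumerate content 0).reverse.find?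
      (dlmlQ ((PySem.List.enumerate original_file_content 0).reverse)) with
  | some p => simp
  | none => simp

theorem detect_B_eq (content original_file_content : List String) :
    detect_last_matching_line_alt content original_file_content
      = (((PySem.List.enumerate content 0).reverse.find?
            (dlmlQ ((PySem.List.enumerate original_file_content 0).reverse))).map
          (dlmlF ((PySem.List.enumerate original_file_content 0).reverse))).getD (0, 0) := by
  unfold detect_last_matching_line_alt
  rw [dlml_outer_eq]
  cases hf : (PySem.List.enumerate content 0).reverse.find?
      (dlmlQ ((PySem.List.enumerate original_file_content 0).reverse)) with
  | some p => simp
  | none => simp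

-- ===== VERDICT (by name: the statement is the Claim_ definition above) =====
theorem detect_last_matching_line_spec : Claim_equal_detect_last_matching_line := by
  intro content original_file_content _ _
  unfold Spec_detect_last_matching_line
  rw [detect_A_eq, detect_B_eq]
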